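-- pv_equiv track=rewrite | github.com/GladwinO/Algorithmic-ML-Final-Project | collect_per_seed_data.py | controlled_width
-- ===== SOURCE A (Python) =====
-- def _params_for(num_layers: int, h: int, in_dim: int = 2, out_dim: int = 1) -> int:
--     p = in_dim * h + h
--     p += (num_layers - 1) * (h * h + h)
--     p += h * out_dim + out_dim
--     return p
--
-- def controlled_width(num_layers: int, target: int, h_min: int = 8, h_max: int = 4000) -> int:
--     best_h, best_diff = h_min, float("inf")
--     for h in range(h_min, h_max + 1):
--         diff = abs(_params_for(num_layers, h) - target)
--         if diff < best_diff:
--             best_diff = diff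
--             best_h = h
--     return best_h
-- ===== SOURCE B (Python) =====
-- def controlled_width(num_layers, target, h_min=8, h_max=4000):
--     # O(log(h_max-h_min)): param count is a quadratic q(h); the smallest argmin of
--     # |q(h)| lies at an interval end, the integer vertex, or next to a sign change
--     # of q on one of its two monotone branches (found by binary search).
--     if h_max < h_min:
--         return h_min
--     a = num_layers - 1
--     b = num_layers + 3
--     c = 1 - target
--     if a < 0:
--         a, b, c = -a, -b, -c
--
--     def q(h):
--         return (a * h + b) * h + c
--
--     # h0: first h from which q is nondecreasing (q nonincreasing before h0)
--     h0 = h_min if a == 0 else -((a + b) // (2 * a))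
--
--     def bisect_first(lo, hi, pred):
--         # least h in [lo, hi] with pred(h), for pred monotone False->True; hi+1 if none
--         j = hi + 1
--         while lo < j:
--             mid = (lo + j) // 2
--             if pred(mid):
--                 j = mid
--             else:
--                 lo = mid + 1
--         return j
--
--     cands = [h_min, h_max]
--     if h_min <= h0 <= h_max:
--         cands.append(h0)
--     r1 = min(h0, h_max)
--     if h_min <= r1:
--         j = bisect_first(h_min, r1, lambda h: q(h) < 0)
--         cands.append(j - 1)
--         cands.append(j)
--     l2 = max(h0, h_min)
--     if l2 <= h_max:
--         k = bisect_first(l2, h_max, lambda h: q(h) >= 0)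
--         cands.append(k - 1)
--         cands.append(k)
--     best = None
--     for h in cands:
--         if h_min <= h <= h_max:
--             key = (abs(q(h)), h)
--             if best is None or key < best:
--                 best = key
--     return best[1]
-- ===== Notes on version B (the rewrite author's own statement) =====
-- stated objective: faster
-- what changed: A scans every width in [h_min, h_max] keeping the best |params-target|; B notes the parameter count is a quadratic q(h), normalizes its leading coefficient to be nonnegative, and evaluates only O(1) candidates: the interval ends, the integer vertex, and the integers adjacent to q's sign changes on its two monotone branches, each located by binary search.
import Mathlib
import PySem

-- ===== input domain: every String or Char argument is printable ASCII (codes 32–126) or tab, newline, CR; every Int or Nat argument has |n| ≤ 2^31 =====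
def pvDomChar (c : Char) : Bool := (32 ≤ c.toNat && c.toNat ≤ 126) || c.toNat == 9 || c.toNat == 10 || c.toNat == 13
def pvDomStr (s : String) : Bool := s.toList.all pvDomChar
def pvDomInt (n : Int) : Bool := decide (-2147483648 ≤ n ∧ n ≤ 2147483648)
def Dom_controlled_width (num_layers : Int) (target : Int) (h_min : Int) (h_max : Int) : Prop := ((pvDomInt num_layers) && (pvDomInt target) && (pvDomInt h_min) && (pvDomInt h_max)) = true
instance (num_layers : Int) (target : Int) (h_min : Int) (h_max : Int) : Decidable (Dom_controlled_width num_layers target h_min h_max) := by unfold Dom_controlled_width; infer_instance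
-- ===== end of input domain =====

-- B replaces A's linear scan over [h_min, h_max] by O(log(h_max-h_min)) work: the parameter
-- count is a quadratic q(h), so the best width is at an interval end, the integer vertex, or
-- next to a sign change of q on one of its two monotone branches (found by binary search).

-- ===== PORT A =====
def pvParamsFor (num_layers : Int) (h : Int) (in_dim : Int) (out_dim : Int) : Int :=
  let p := in_dim * h + h
  let p := p + (num_layers - 1) * (h * h + h)
  let p := p + (h * out_dim + out_dim)
  p

def pvStepA (num_layers : Int) (target : Int) (st : Int × Option Int) (h : Int) : Int × Option Int :=
  let diff := |pvParamsFor num_layers h 2 1 - target|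
  match st.2 with
  | none => (h, some diff)                                   -- any int diff < float("inf")
  | some bd => if diff < bd then (h, some diff) else st

def controlled_width (num_layers : Int) (target : Int) (h_min : Int) (h_max : Int) : Int :=
  ((PySem.List.pyRange h_min (h_max + 1)).foldl (pvStepA num_layers target) (h_min, none)).1

-- ===== PORT B =====
-- (transliteration of Source B; its nested defs/loops become the named helpers below)
def pvQ (a : Int) (b : Int) (c : Int) (h : Int) : Int := (a * h + b) * h + c

-- Source B's `h0 = h_min if a == 0 else -((a + b) // (2 * a))`
def pvH0 (a : Int) (b : Int) (lo : Int) : Int :=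
  if a = 0 then lo else -(PySem.Int.floordiv (a + b) (2 * a))

-- the while-loop of Source B's bisect_first: state (lo, j), j starts at hi+1
def pvBisectLoop (pred : Int → Bool) (lo : Int) (j : Int) : Int :=
  if hlt : lo < j then
    let mid := PySem.Int.floordiv (lo + j) 2
    if pred mid then pvBisectLoop pred lo mid
    else pvBisectLoop pred (mid + 1) j
  else j
termination_by (j - lo).toNat
decreasing_by
  · have h2 := (PySem.Int.floordiv_lt_iff_lt_mul (a := lo + j) (b := 2) (q := j) (by omega)).mpr (by omega)
    omega
  · have h2 := (PySem.Int.le_floordiv_iff_mul_le (a := lo + j) (b := 2) (q := lo) (by omega)).mpr (by omega)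
    omega

def pvBisectFirst (lo : Int) (hi : Int) (pred : Int → Bool) : Int :=
  pvBisectLoop pred lo (hi + 1)

-- Source B's construction of the candidate list
def pvCands (a : Int) (b : Int) (c : Int) (lo : Int) (hi : Int) : List Int :=
  let h0 := pvH0 a b lo
  let cands := [lo, hi]
  let cands := if lo ≤ h0 ∧ h0 ≤ hi then cands ++ [h0] else cands
  let r1 := min h0 hi
  let cands := if lo ≤ r1 then
      let j := pvBisectFirst lo r1 (fun h => decide (pvQ a b c h < 0))
      cands ++ [j - 1, j]
    else cands
  let l2 := max h0 lo
  let cands := if l2 ≤ hi then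
      let k := pvBisectFirst l2 hi (fun h => decide (0 ≤ pvQ a b c h))
      cands ++ [k - 1, k]
    else cands
  cands

-- Source B's final `for h in cands:` loop keeping the lexicographically least (|q h|, h)
def pvPick (a : Int) (b : Int) (c : Int) (lo : Int) (hi : Int)
    (best : Option (Int × Int)) (h : Int) : Option (Int × Int) :=
  if lo ≤ h ∧ h ≤ hi then
    let key := (|pvQ a b c h|, h)
    match best with
    | none => some key
    | some bk => if key.1 < bk.1 ∨ (key.1 = bk.1 ∧ key.2 < bk.2) then some key else best
  else best

def pvBCore (a : Int) (b : Int) (c : Int) (lo : Int) (hi : Int) : Int :=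
  match (pvCands a b c lo hi).foldl (pvPick a b c lo hi) none with
  | some bk => bk.2
  | none => lo   -- unreachable: h_min is always an admissible candidate

def controlled_width_alt (num_layers : Int) (target : Int) (h_min : Int) (h_max : Int) : Int :=
  if h_max < h_min then h_min
  else
    let a0 := num_layers - 1
    let b0 := num_layers + 3
    let c0 := 1 - target
    if a0 < 0 then pvBCore (-a0) (-b0) (-c0) h_min h_max
    else pvBCore a0 b0 c0 h_min h_max

-- ===== PRECONDITION & SPEC =====
def Spec_controlled_width (num_layers : Int) (target : Int) (h_min : Int) (h_max : Int) (out : Int) : Prop := out = controlled_width_alt num_layers target h_min h_max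
instance (num_layers : Int) (target : Int) (h_min : Int) (h_max : Int) (out : Int) : Decidable (Spec_controlled_width num_layers target h_min h_max out) := by unfold Spec_controlled_width; infer_instance

-- ===== CLAIM (what is proved, stated in full; the proofs are below) =====
def Claim_equal_controlled_width : Prop := ∀ (num_layers : Int) (target : Int) (h_min : Int) (h_max : Int), Dom_controlled_width num_layers target h_min h_max → Spec_controlled_width num_layers target h_min h_max (controlled_width num_layers target h_min h_max)

-- ===== LEMMAS AND PROOFS =====

-- the objective A minimizes, and "m is the least argmin of f on [lo, hi]"
def pvF (num_layers : Int) (target : Int) (h : Int) : Int := |pvParamsFor num_layers h 2 1 - target|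

def pvIsLeast (f : Int → Int) (lo : Int) (hi : Int) (m : Int) : Prop :=
  lo ≤ m ∧ m ≤ hi ∧ (∀ h, lo ≤ h → h ≤ hi → f m ≤ f h) ∧ (∀ h, lo ≤ h → h < m → f m < f h)

lemma pvQ_sub (a b c x y : Int) : pvQ a b c y - pvQ a b c x = (y - x) * (a * (x + y) + b) := by
  simp only [pvQ]; ring

lemma pvQ_step (a b c h : Int) : pvQ a b c (h + 1) - pvQ a b c h = 2 * a * h + a + b := by
  simp only [pvQ]; ring

lemma pvQ_conv (a b c m : Int) :
    pvQ a b c (m + 1) + pvQ a b c (m - 1) - 2 * pvQ a b c m = 2 * a := by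
  simp only [pvQ]; ring

lemma pvQ_abs_unflipped (num_layers target h : Int) :
    |pvQ (num_layers - 1) (num_layers + 3) (1 - target) h| = pvF num_layers target h := by
  have : pvQ (num_layers - 1) (num_layers + 3) (1 - target) h
       = pvParamsFor num_layers h 2 1 - target := by
    simp only [pvQ, pvParamsFor]; ring
  rw [pvF, this]

lemma pvQ_abs_flipped (num_layers target h : Int) :
    |pvQ (-(num_layers - 1)) (-(num_layers + 3)) (-(1 - target)) h| = pvF num_layers target h := by
  have : pvQ (-(num_layers - 1)) (-(num_layers + 3)) (-(1 - target)) h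
       = -(pvParamsFor num_layers h 2 1 - target) := by
    simp only [pvQ, pvParamsFor]; ring
  rw [pvF, this, abs_neg]

-- ---- A-side: the scan computes the least argmin ----

lemma pvA_fold (num_layers target lo : Int) :
    ∀ (j : Int), lo ≤ j →
      ∃ m, (PySem.List.pyRange lo (j + 1)).foldl (pvStepA num_layers target) (lo, none) =
             (m, some (pvF num_layers target m)) ∧
           pvIsLeast (pvF num_layers target) lo j m := by
  intro j hj
  induction j, hj using Int.le_induction with
  | base =>
    have h0 : PySem.List.pyRange lo (lo + 1) = PySem.List.pyRange lo lo ++ [lo] :=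
      PySem.List.pyRange_one_succ_right le_rfl
    have h1 : PySem.List.pyRange lo lo = [] := by
      refine List.eq_nil_of_length_eq_zero ?_
      rw [PySem.List.length_pyRange_one]; omega
    refine ⟨lo, ?_, le_rfl, le_rfl, ?_, ?_⟩
    · rw [h0, h1]; simp [pvStepA, pvF]
    · intro h hh1 hh2
      have : h = lo := le_antisymm hh2 hh1
      rw [this]
    · intro h hh1 hh2; omega
  | succ j hj ih =>
    obtain ⟨m, hfold, hm1, hm2, hmin, hstrict⟩ := ih
    have hsplit : PySem.List.pyRange lo (j + 1 + 1) = PySem.List.pyRange lo (j + 1) ++ [j + 1] :=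
      PySem.List.pyRange_one_succ_right (by omega)
    rw [hsplit, List.foldl_append, hfold]
    by_cases hc : pvF num_layers target (j + 1) < pvF num_layers target m
    · refine ⟨j + 1, ?_, by omega, le_rfl, ?_, ?_⟩
      · simp only [List.foldl_cons, List.foldl_nil, pvStepA]
        unfold pvF at hc ⊢
        rw [if_pos hc]
      · intro h hh1 hh2
        rcases lt_or_ge h (j + 1) with hlt | hge
        · have := hmin h hh1 (by omega); omega
        · have : h = j + 1 := by omega
          rw [this]
      · intro h hh1 hh2
        have := hmin h hh1 (by omega); omega
    · refine ⟨m, ?_, hm1, by omega, ?_, ?_⟩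
      · simp only [List.foldl_cons, List.foldl_nil, pvStepA]
        unfold pvF at hc ⊢
        rw [if_neg hc]
      · intro h hh1 hh2
        rcases lt_or_ge h (j + 1) with hlt | hge
        · exact hmin h hh1 (by omega)
        · have : h = j + 1 := by omega
          rw [this]; omega
      · exact hstrict

-- ---- bisection: pvBisectLoop finds the least index satisfying a monotone predicate ----

lemma pvBisectLoop_spec (pred : Int → Bool) (lo0 hi0 : Int)
    (mono : ∀ x y, lo0 ≤ x → x ≤ y → y ≤ hi0 → pred x = true → pred y = true) :
    ∀ n (lo j : Int), (j - lo).toNat = n → lo0 ≤ lo → lo ≤ j → j ≤ hi0 + 1 →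
      lo ≤ pvBisectLoop pred lo j ∧ pvBisectLoop pred lo j ≤ j ∧
      (∀ h, lo ≤ h → h < pvBisectLoop pred lo j → pred h = false) ∧
      (pvBisectLoop pred lo j = j ∨ pred (pvBisectLoop pred lo j) = true) := by
  intro n
  induction n using Nat.strong_induction_on with
  | _ n ih =>
    intro lo j hn hlo0 hlj hj
    rw [pvBisectLoop]
    by_cases hlt : lo < j
    · rw [dif_pos hlt]
      have hb1 : lo ≤ PySem.Int.floordiv (lo + j) 2 :=
        (PySem.Int.le_floordiv_iff_mul_le (by omega)).mpr (by omega)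
      have hb2 : PySem.Int.floordiv (lo + j) 2 < j :=
        (PySem.Int.floordiv_lt_iff_lt_mul (by omega)).mpr (by omega)
      set mid := PySem.Int.floordiv (lo + j) 2 with hmid
      by_cases hp : pred mid = true
      · rw [if_pos hp]
        have hrec := ih (mid - lo).toNat (by omega) lo mid rfl hlo0 (by omega) (by omega)
        refine ⟨hrec.1, by omega, hrec.2.2.1, ?_⟩
        rcases hrec.2.2.2 with h | h
        · right; rw [h]; exact hp
        · right; exact h
      · rw [if_neg hp]
        have hrec := ih (j - (mid + 1)).toNat (by omega) (mid + 1) j rfl (by omega) (by omega) hj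
        refine ⟨by omega, hrec.2.1, ?_, hrec.2.2.2⟩
        intro h hh1 hh2
        by_cases hcase : h ≤ mid
        · cases hpredh : pred h with
          | false => rfl
          | true =>
            exact absurd (mono h mid (by omega) hcase (by omega) hpredh) (by simpa using hp)
        · exact hrec.2.2.1 h (by omega) hh2
    · rw [dif_neg hlt]
      exact ⟨by omega, le_rfl, by intro h hh1 hh2; omega, Or.inl rfl⟩

-- ---- B-side: the candidate fold returns the lexicographically least admissible key ----

lemma pvPick_le (a b c lo hi x : Int) (acc : Option (Int × Int)) (h1 : lo ≤ x) (h2 : x ≤ hi) :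
    ∃ p, pvPick a b c lo hi acc x = some p ∧
      (p.1 < |pvQ a b c x| ∨ (p.1 = |pvQ a b c x| ∧ p.2 ≤ x)) := by
  unfold pvPick
  rw [if_pos ⟨h1, h2⟩]
  cases acc with
  | none => exact ⟨_, rfl, Or.inr ⟨rfl, le_rfl⟩⟩
  | some bk =>
    show ∃ p, (if |pvQ a b c x| < bk.1 ∨ (|pvQ a b c x| = bk.1 ∧ x < bk.2)
        then some (|pvQ a b c x|, x) else some bk) = some p ∧
      (p.1 < |pvQ a b c x| ∨ (p.1 = |pvQ a b c x| ∧ p.2 ≤ x))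
    by_cases hc : |pvQ a b c x| < bk.1 ∨ (|pvQ a b c x| = bk.1 ∧ x < bk.2)
    · rw [if_pos hc]; exact ⟨_, rfl, Or.inr ⟨rfl, le_rfl⟩⟩
    · rw [if_neg hc]
      push_neg at hc
      refine ⟨bk, rfl, ?_⟩
      rcases lt_trichotomy bk.1 (|pvQ a b c x|) with h | h | h
      · exact Or.inl h
      · exact Or.inr ⟨h, by have := hc.2 h.symm; omega⟩
      · omega

lemma pvPick_keeps (a b c lo hi x : Int) (acc : Option (Int × Int)) (p : Int × Int)
    (hacc : acc = some p) :
    ∃ p', pvPick a b c lo hi acc x = some p' ∧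
      (p'.1 < p.1 ∨ (p'.1 = p.1 ∧ p'.2 ≤ p.2)) := by
  subst hacc
  unfold pvPick
  by_cases hin : lo ≤ x ∧ x ≤ hi
  · rw [if_pos hin]
    show ∃ p', (if |pvQ a b c x| < p.1 ∨ (|pvQ a b c x| = p.1 ∧ x < p.2)
        then some (|pvQ a b c x|, x) else some p) = some p' ∧
      (p'.1 < p.1 ∨ (p'.1 = p.1 ∧ p'.2 ≤ p.2))
    by_cases hc : |pvQ a b c x| < p.1 ∨ (|pvQ a b c x| = p.1 ∧ x < p.2)
    · rw [if_pos hc]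
      rcases hc with h | h
      · exact ⟨_, rfl, Or.inl h⟩
      · exact ⟨_, rfl, Or.inr ⟨h.1, le_of_lt h.2⟩⟩
    · rw [if_neg hc]; exact ⟨p, rfl, Or.inr ⟨rfl, le_rfl⟩⟩
  · rw [if_neg hin]; exact ⟨p, rfl, Or.inr ⟨rfl, le_rfl⟩⟩

lemma pvPick_good (a b c lo hi x : Int) (acc : Option (Int × Int))
    (hacc : ∀ p, acc = some p → p.1 = |pvQ a b c p.2| ∧ lo ≤ p.2 ∧ p.2 ≤ hi) :
    ∀ p, pvPick a b c lo hi acc x = some p → p.1 = |pvQ a b c p.2| ∧ lo ≤ p.2 ∧ p.2 ≤ hi := by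
  intro p
  unfold pvPick
  by_cases hin : lo ≤ x ∧ x ≤ hi
  · rw [if_pos hin]
    cases acc with
    | none =>
      show some (|pvQ a b c x|, x) = some p → _
      intro hp
      have : (|pvQ a b c x|, x) = p := by injection hp
      rw [← this]
      exact ⟨rfl, hin.1, hin.2⟩
    | some bk =>
      show (if |pvQ a b c x| < bk.1 ∨ (|pvQ a b c x| = bk.1 ∧ x < bk.2)
          then some (|pvQ a b c x|, x) else some bk) = some p → _
      intro hp
      by_cases hc : |pvQ a b c x| < bk.1 ∨ (|pvQ a b c x| = bk.1 ∧ x < bk.2)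
      · rw [if_pos hc] at hp
        have : (|pvQ a b c x|, x) = p := by injection hp
        rw [← this]
        exact ⟨rfl, hin.1, hin.2⟩
      · rw [if_neg hc] at hp; exact hacc p hp
  · rw [if_neg hin]; exact hacc p

lemma pvPick_fold (a b c lo hi : Int) :
    ∀ (C : List Int) (acc : Option (Int × Int)),
      (∀ p, acc = some p → p.1 = |pvQ a b c p.2| ∧ lo ≤ p.2 ∧ p.2 ≤ hi) →
      (∀ p, C.foldl (pvPick a b c lo hi) acc = some p →
          p.1 = |pvQ a b c p.2| ∧ lo ≤ p.2 ∧ p.2 ≤ hi) ∧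
      (∀ h, h ∈ C → lo ≤ h → h ≤ hi →
          ∃ p, C.foldl (pvPick a b c lo hi) acc = some p ∧
            (p.1 < |pvQ a b c h| ∨ (p.1 = |pvQ a b c h| ∧ p.2 ≤ h))) ∧
      (∀ p, acc = some p →
          ∃ p', C.foldl (pvPick a b c lo hi) acc = some p' ∧
            (p'.1 < p.1 ∨ (p'.1 = p.1 ∧ p'.2 ≤ p.2))) := by
  intro C
  induction C with
  | nil =>
    intro acc hacc
    refine ⟨hacc, ?_, ?_⟩
    · intro h hh; cases hh
    · intro p hp; exact ⟨p, hp, Or.inr ⟨rfl, le_rfl⟩⟩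
  | cons x C ih =>
    intro acc hacc
    have hacc' := pvPick_good a b c lo hi x acc hacc
    obtain ⟨g1, g2, g3⟩ := ih (pvPick a b c lo hi acc x) hacc'
    refine ⟨by simpa using g1, ?_, ?_⟩
    · intro h hh hh1 hh2
      rcases List.mem_cons.mp hh with hhead | htail
      · subst hhead
        obtain ⟨p, hp, hple⟩ := pvPick_le a b c lo hi h acc hh1 hh2
        obtain ⟨p', hp', hple'⟩ := g3 p hp
        refine ⟨p', by simpa using hp', ?_⟩
        omega
      · obtain ⟨p, hp, hple⟩ := g2 h htail hh1 hh2
        exact ⟨p, by simpa using hp, hple⟩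
    · intro p hp
      obtain ⟨p1, hp1, hle1⟩ := pvPick_keeps a b c lo hi x acc p hp
      obtain ⟨p', hp', hle'⟩ := g3 p1 hp1
      refine ⟨p', by simpa using hp', ?_⟩
      omega

-- the fold over any candidate list containing the least argmin returns exactly it
lemma pvBCore_eq (a b c lo hi m : Int) (hm : m ∈ pvCands a b c lo hi)
    (hL : pvIsLeast (fun h => |pvQ a b c h|) lo hi m) : pvBCore a b c lo hi = m := by
  obtain ⟨hm1, hm2, hmin, hstrict⟩ := hL
  dsimp only at hmin hstrict
  obtain ⟨g1, g2, _⟩ := pvPick_fold a b c lo hi (pvCands a b c lo hi) none (by intro p hp; cases hp)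
  obtain ⟨p, hp, hple⟩ := g2 m hm hm1 hm2
  obtain ⟨he, hlo, hhi⟩ := g1 p hp
  have h1 : |pvQ a b c m| ≤ |pvQ a b c p.2| := hmin p.2 hlo hhi
  have hp2 : p.2 = m := by
    by_cases hlt : p.2 < m
    · have := hstrict p.2 hlo hlt; omega
    · omega
  unfold pvBCore
  rw [hp]
  show p.2 = m
  exact hp2

-- membership in the candidate list from the defining disjunction
lemma pvCands_mem (a b c lo hi m : Int)
    (hm : m = lo ∨ m = hi ∨
          (lo ≤ pvH0 a b lo ∧ pvH0 a b lo ≤ hi ∧ m = pvH0 a b lo) ∨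
          (lo ≤ min (pvH0 a b lo) hi ∧
            (m = pvBisectFirst lo (min (pvH0 a b lo) hi) (fun h => decide (pvQ a b c h < 0)) - 1 ∨
             m = pvBisectFirst lo (min (pvH0 a b lo) hi) (fun h => decide (pvQ a b c h < 0)))) ∨
          (max (pvH0 a b lo) lo ≤ hi ∧
            (m = pvBisectFirst (max (pvH0 a b lo) lo) hi (fun h => decide (0 ≤ pvQ a b c h)) - 1 ∨
             m = pvBisectFirst (max (pvH0 a b lo) lo) hi (fun h => decide (0 ≤ pvQ a b c h))))) :
    m ∈ pvCands a b c lo hi := by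
  simp only [pvCands]
  split_ifs with hc1 hc2 hc3 <;> simp <;> tauto

-- ---- completeness: the least argmin of |q| is among B's candidates ----

lemma pvMem_cands (a b c lo hi m : Int) (ha : 0 ≤ a) (hb : a = 0 → 0 < b)
    (hL : pvIsLeast (fun h => |pvQ a b c h|) lo hi m) : m ∈ pvCands a b c lo hi := by
  obtain ⟨hm1, hm2, hmin, hstrict⟩ := hL
  dsimp only at hmin hstrict
  apply pvCands_mem
  by_cases hmlo : m = lo
  · exact Or.inl hmlo
  by_cases hmhi : m = hi
  · exact Or.inr (Or.inl hmhi)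
  have hint1 : lo < m := by omega
  have hint2 : m < hi := by omega
  set h0 := pvH0 a b lo with hh0def
  set F := PySem.Int.floordiv (a + b) (2 * a) with hFdef
  have hh0 : h0 = if a = 0 then lo else -F := by rw [hh0def]; rfl
  have hfd : a = 0 ∨ (0 < a ∧ F * (2 * a) ≤ a + b ∧ a + b < (F + 1) * (2 * a)) := by
    rcases eq_or_lt_of_le ha with haz | hapos
    · exact Or.inl haz.symm
    · exact Or.inr ⟨hapos, (PySem.Int.floordiv_eq_iff_of_pos (by omega)).mp rfl⟩
  have HU1 : ∀ h : Int, 2 * a * h + a + b < 0 → h < h0 := by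
    intro h hd
    rcases hfd with haz | ⟨hapos, hFl, hFu⟩
    · exfalso; have := hb haz; rw [haz] at hd; simp at hd; omega
    · rw [hh0, if_neg (by omega)]
      by_contra hcon
      push_neg at hcon
      nlinarith [mul_le_mul_of_nonneg_left hcon (show (0:ℤ) ≤ 2 * a by omega), hFl, hd]
  have HU2 : ∀ h : Int, lo ≤ h → 0 ≤ 2 * a * h + a + b → h0 ≤ h := by
    intro h hloh hd
    rcases hfd with haz | ⟨hapos, hFl, hFu⟩
    · rw [hh0, if_pos haz]; exact hloh
    · rw [hh0, if_neg (by omega)]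
      by_contra hcon
      push_neg at hcon
      have hcon' : h ≤ -F - 1 := by omega
      nlinarith [mul_le_mul_of_nonneg_left hcon' (show (0:ℤ) ≤ 2 * a by omega), hFu, hd]
  have HM1 : ∀ x y : Int, lo ≤ x → x ≤ y → y ≤ h0 → pvQ a b c y ≤ pvQ a b c x := by
    intro x y hx hxy hy
    rcases eq_or_lt_of_le hxy with heq | hlt
    · rw [heq]
    · have hsub := pvQ_sub a b c x y
      rcases hfd with haz | ⟨hapos, hFl, hFu⟩
      · exfalso; rw [hh0, if_pos haz] at hy; omega
      · rw [hh0, if_neg (by omega)] at hy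
        have hfac : a * (x + y) + b < 0 := by
          nlinarith [mul_le_mul_of_nonneg_left (show x + y ≤ 2 * (-F) - 1 by omega) ha, hFu]
        nlinarith [mul_nonneg (show (0:ℤ) ≤ y - x by omega)
          (show (0:ℤ) ≤ -(a * (x + y) + b) by omega), hsub]
  have HM2 : ∀ x y : Int, h0 ≤ x → x ≤ y → pvQ a b c x ≤ pvQ a b c y := by
    intro x y hx hxy
    rcases eq_or_lt_of_le hxy with heq | hlt
    · rw [heq]
    · have hsub := pvQ_sub a b c x y
      rcases hfd with haz | ⟨hapos, hFl, hFu⟩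
      · have hbpos := hb haz
        have hfac : 0 ≤ a * (x + y) + b := by rw [haz]; simp; omega
        nlinarith [mul_nonneg (show (0:ℤ) ≤ y - x by omega) hfac, hsub]
      · rw [hh0, if_neg (by omega)] at hx
        have hfac : 0 ≤ a * (x + y) + b := by
          nlinarith [mul_le_mul_of_nonneg_left (show 2 * x + 1 ≤ x + y by omega) ha,
            mul_le_mul_of_nonneg_left (show -F ≤ x by omega) (show (0:ℤ) ≤ 2 * a by omega), hFl]
        nlinarith [mul_nonneg (show (0:ℤ) ≤ y - x by omega) hfac, hsub]
  have hfm1 : |pvQ a b c m| < |pvQ a b c (m - 1)| := hstrict (m - 1) (by omega) (by omega)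
  have hfm2 : |pvQ a b c m| ≤ |pvQ a b c (m + 1)| := hmin (m + 1) (by omega) (by omega)
  have hstep1 := pvQ_step a b c (m - 1)
  rw [show m - 1 + 1 = m by omega] at hstep1
  have hstep2 := pvQ_step a b c m
  have hconv := pvQ_conv a b c m
  by_cases hqm : 0 ≤ pvQ a b c m
  · by_cases hqp : pvQ a b c (m + 1) < 0
    · -- downward sign change at m → m+1: m is the last h with q h ≥ 0 on the falling branch
      have hmh0 : m < h0 := HU1 m (by omega)
      have hr1a : min h0 hi ≤ h0 := min_le_left _ _
      have hr1b : min h0 hi ≤ hi := min_le_right _ _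
      have hr1c : lo ≤ min h0 hi := le_min (by omega) (by omega)
      have hm_r1 : m ≤ min h0 hi := le_min (by omega) (by omega)
      set r1 := min h0 hi with hr1def
      have hmono : ∀ x y : Int, lo ≤ x → x ≤ y → y ≤ r1 →
          (fun h => decide (pvQ a b c h < 0)) x = true →
          (fun h => decide (pvQ a b c h < 0)) y = true := by
        intro x y hx hxy hy hqx
        simp only [decide_eq_true_eq] at hqx ⊢
        have := HM1 x y hx hxy (by omega)
        omega
      obtain ⟨s1, s2, s3, s4⟩ := pvBisectLoop_spec _ lo r1 hmono
        ((r1 + 1 - lo).toNat) lo (r1 + 1) rfl le_rfl (by omega) le_rfl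
      set jj := pvBisectLoop (fun h => decide (pvQ a b c h < 0)) lo (r1 + 1) with hjjdef
      have hjle : jj ≤ m + 1 := by
        by_contra hcon
        push_neg at hcon
        have := s3 (m + 1) (by omega) (by omega)
        simp only [decide_eq_false_iff_not] at this
        omega
      have hjge : m + 1 ≤ jj := by
        by_contra hcon
        push_neg at hcon
        rcases s4 with hs | hs
        · omega
        · simp only [decide_eq_true_eq] at hs
          have := HM1 jj m s1 (by omega) (by omega)
          omega
      right; right; right; left
      refine ⟨hr1c, Or.inl ?_⟩
      unfold pvBisectFirst
      rw [← hjjdef]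
      omega
    · push_neg at hqp
      by_cases hqm0 : pvQ a b c (m - 1) < 0
      · -- upward sign change at m-1 → m, on the rising branch: m is the first h with q h ≥ 0
        have hm1h0 : h0 ≤ m - 1 := HU2 (m - 1) (by omega) (by omega)
        have hl2a : h0 ≤ max h0 lo := le_max_left _ _
        have hl2b : lo ≤ max h0 lo := le_max_right _ _
        have hl2c : max h0 lo ≤ m - 1 := max_le (by omega) (by omega)
        set l2 := max h0 lo with hl2def
        have hcond : l2 ≤ hi := by omega
        have hmono : ∀ x y : Int, l2 ≤ x → x ≤ y → y ≤ hi →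
            (fun h => decide (0 ≤ pvQ a b c h)) x = true →
            (fun h => decide (0 ≤ pvQ a b c h)) y = true := by
          intro x y hx hxy hy hqx
          simp only [decide_eq_true_eq] at hqx ⊢
          have := HM2 x y (by omega) hxy
          omega
        obtain ⟨s1, s2, s3, s4⟩ := pvBisectLoop_spec _ l2 hi hmono
          ((hi + 1 - l2).toNat) l2 (hi + 1) rfl le_rfl (by omega) le_rfl
        set kk := pvBisectLoop (fun h => decide (0 ≤ pvQ a b c h)) l2 (hi + 1) with hkkdef
        have hkle : kk ≤ m := by
          by_contra hcon
          push_neg at hcon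
          have := s3 m (by omega) (by omega)
          simp only [decide_eq_false_iff_not] at this
          omega
        have hkge : m ≤ kk := by
          by_contra hcon
          push_neg at hcon
          rcases s4 with hs | hs
          · omega
          · simp only [decide_eq_true_eq] at hs
            have := HM2 kk (m - 1) (by omega) (by omega)
            omega
        right; right; right; right
        refine ⟨hcond, Or.inr ?_⟩
        unfold pvBisectFirst
        rw [← hkkdef]
        omega
      · push_neg at hqm0
        -- all of q(m-1), q m, q(m+1) nonnegative: m is the integer vertex h0
        have habs1 : pvQ a b c m < pvQ a b c (m - 1) := by
          rw [abs_of_nonneg hqm, abs_of_nonneg hqm0] at hfm1; exact hfm1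
        have habs2 : pvQ a b c m ≤ pvQ a b c (m + 1) := by
          rw [abs_of_nonneg hqm, abs_of_nonneg hqp] at hfm2; exact hfm2
        have h1 : m - 1 < h0 := HU1 (m - 1) (by omega)
        have h2 : h0 ≤ m := HU2 m (by omega) (by omega)
        right; right; left
        exact ⟨by omega, by omega, by omega⟩
  · push_neg at hqm
    by_cases hqm0 : 0 ≤ pvQ a b c (m - 1)
    · -- downward sign change at m-1 → m: m is the first h with q h < 0 on the falling branch
      have hmh0 : m - 1 < h0 := HU1 (m - 1) (by omega)
      have hr1a : min h0 hi ≤ h0 := min_le_left _ _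
      have hr1b : min h0 hi ≤ hi := min_le_right _ _
      have hr1c : lo ≤ min h0 hi := le_min (by omega) (by omega)
      have hm_r1 : m ≤ min h0 hi := le_min (by omega) (by omega)
      set r1 := min h0 hi with hr1def
      have hmono : ∀ x y : Int, lo ≤ x → x ≤ y → y ≤ r1 →
          (fun h => decide (pvQ a b c h < 0)) x = true →
          (fun h => decide (pvQ a b c h < 0)) y = true := by
        intro x y hx hxy hy hqx
        simp only [decide_eq_true_eq] at hqx ⊢
        have := HM1 x y hx hxy (by omega)
        omega
      obtain ⟨s1, s2, s3, s4⟩ := pvBisectLoop_spec _ lo r1 hmono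
        ((r1 + 1 - lo).toNat) lo (r1 + 1) rfl le_rfl (by omega) le_rfl
      set jj := pvBisectLoop (fun h => decide (pvQ a b c h < 0)) lo (r1 + 1) with hjjdef
      have hjle : jj ≤ m := by
        by_contra hcon
        push_neg at hcon
        have := s3 m (by omega) (by omega)
        simp only [decide_eq_false_iff_not] at this
        omega
      have hjge : m ≤ jj := by
        by_contra hcon
        push_neg at hcon
        rcases s4 with hs | hs
        · omega
        · simp only [decide_eq_true_eq] at hs
          have := HM1 jj (m - 1) s1 (by omega) (by omega)
          omega
      right; right; right; left
      refine ⟨hr1c, Or.inr ?_⟩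
      unfold pvBisectFirst
      rw [← hjjdef]
      omega
    · push_neg at hqm0
      by_cases hqp : 0 ≤ pvQ a b c (m + 1)
      · -- upward sign change at m → m+1: m is the last h with q h < 0 on the rising branch
        have hmh0 : h0 ≤ m := HU2 m (by omega) (by omega)
        have hl2a : h0 ≤ max h0 lo := le_max_left _ _
        have hl2b : lo ≤ max h0 lo := le_max_right _ _
        have hl2c : max h0 lo ≤ m := max_le (by omega) (by omega)
        set l2 := max h0 lo with hl2def
        have hcond : l2 ≤ hi := by omega
        have hmono : ∀ x y : Int, l2 ≤ x → x ≤ y → y ≤ hi →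
            (fun h => decide (0 ≤ pvQ a b c h)) x = true →
            (fun h => decide (0 ≤ pvQ a b c h)) y = true := by
          intro x y hx hxy hy hqx
          simp only [decide_eq_true_eq] at hqx ⊢
          have := HM2 x y (by omega) hxy
          omega
        obtain ⟨s1, s2, s3, s4⟩ := pvBisectLoop_spec _ l2 hi hmono
          ((hi + 1 - l2).toNat) l2 (hi + 1) rfl le_rfl (by omega) le_rfl
        set kk := pvBisectLoop (fun h => decide (0 ≤ pvQ a b c h)) l2 (hi + 1) with hkkdef
        have hkle : kk ≤ m + 1 := by
          by_contra hcon
          push_neg at hcon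
          have := s3 (m + 1) (by omega) (by omega)
          simp only [decide_eq_false_iff_not] at this
          omega
        have hkge : m + 1 ≤ kk := by
          by_contra hcon
          push_neg at hcon
          rcases s4 with hs | hs
          · omega
          · simp only [decide_eq_true_eq] at hs
            have := HM2 kk m (by omega) (by omega)
            omega
        right; right; right; right
        refine ⟨hcond, Or.inl ?_⟩
        unfold pvBisectFirst
        rw [← hkkdef]
        omega
      · push_neg at hqp
        exfalso
        have h1 : pvQ a b c (m - 1) < pvQ a b c m := by
          rw [abs_of_neg hqm, abs_of_neg hqm0] at hfm1; omega
        have h2 : pvQ a b c (m + 1) ≤ pvQ a b c m := by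
          rw [abs_of_neg hqm, abs_of_neg hqp] at hfm2; omega
        omega

-- ===== VERDICT (by name: the statement is the Claim_ definition above) =====
theorem controlled_width_spec : Claim_equal_controlled_width := by
  intro L t lo hi _
  show controlled_width L t lo hi = controlled_width_alt L t lo hi
  by_cases hord : hi < lo
  · have hr : PySem.List.pyRange lo (hi + 1) = [] := by
      have := PySem.List.length_pyRange_one lo (hi + 1)
      refine List.eq_nil_of_length_eq_zero ?_
      rw [PySem.List.length_pyRange_one]; omega
    rw [controlled_width, hr, controlled_width_alt, if_pos hord]
    rfl
  · push_neg at hord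
    obtain ⟨m, hfold, hL⟩ := pvA_fold L t lo hi hord
    have hA : controlled_width L t lo hi = m := by rw [controlled_width, hfold]
    rw [hA, controlled_width_alt, if_neg (by omega)]
    by_cases hneg : L - 1 < 0
    · rw [if_pos hneg]
      have hfq : (fun h => |pvQ (-(L - 1)) (-(L + 3)) (-(1 - t)) h|) = pvF L t :=
        funext (fun h => pvQ_abs_flipped L t h)
      have hL' : pvIsLeast (fun h => |pvQ (-(L - 1)) (-(L + 3)) (-(1 - t)) h|) lo hi m := by
        rw [hfq]; exact hL
      exact (pvBCore_eq _ _ _ _ _ m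
        (pvMem_cands _ _ _ _ _ m (by omega) (by omega) hL') hL').symm
    · rw [if_neg hneg]
      have hfq : (fun h => |pvQ (L - 1) (L + 3) (1 - t) h|) = pvF L t :=
        funext (fun h => pvQ_abs_unflipped L t h)
      have hL' : pvIsLeast (fun h => |pvQ (L - 1) (L + 3) (1 - t) h|) lo hi m := by
        rw [hfq]; exact hL
      exact (pvBCore_eq _ _ _ _ _ m
        (pvMem_cands _ _ _ _ _ m (by omega) (by omega) hL') hL').symm
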